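-- pv_equiv track=rewrite | github.com/Haoyi-Zhang/WatermarkScope | projects/CodeMarkBench/scripts/render_paper_figures.py | _common_functional_metric_specs
-- ===== SOURCE A (Python) =====
-- from typing import Any, Iterable
--
-- def _common_functional_metric_specs(series: list[tuple[str, dict[str, Any], str]]) -> list[tuple[str, str]]:
--     if not series:
--         return []
--     metric_specs = [
--         ("compile_success_rate", "Compile"),
--         ("test_pass_rate", "Pass"),
--         ("pass@1", "Pass@1"),
--     ]
--     common: list[tuple[str, str]] = []
--     for key, label in metric_specs:
--         if all(key in metrics for _, metrics, _ in series):
--             common.append((key, label))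
--     if common:
--         return common
--     fallback = [("compile_success_rate", "Compile"), ("test_pass_rate", "Pass")]
--     return [(key, label) for key, label in fallback if any(key in metrics for _, metrics, _ in series)]
-- ===== SOURCE B (Python) =====
-- def _common_functional_metric_specs(series):
--     if not series:
--         return []
--     key_sets = [set(metrics) for _, metrics, _ in series]
--     common_keys = set.intersection(*key_sets)
--     available_keys = set.union(*key_sets)
--     specs = [
--         ("compile_success_rate", "Compile"),
--         ("test_pass_rate", "Pass"),
--         ("pass@1", "Pass@1"),
--     ]
--     chosen = [(k, lbl) for k, lbl in specs if k in common_keys]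
--     if chosen:
--         return chosen
--     return [(k, lbl) for k, lbl in specs[:2] if k in available_keys]
-- ===== Notes on version B (the rewrite author's own statement) =====
-- stated objective: simpler
-- what changed: B builds the intersection and union of the series' key sets once up front and then filters the spec list by set membership, instead of rescanning every series' dict for each candidate key with all(...)/any(...).
import Mathlib
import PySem

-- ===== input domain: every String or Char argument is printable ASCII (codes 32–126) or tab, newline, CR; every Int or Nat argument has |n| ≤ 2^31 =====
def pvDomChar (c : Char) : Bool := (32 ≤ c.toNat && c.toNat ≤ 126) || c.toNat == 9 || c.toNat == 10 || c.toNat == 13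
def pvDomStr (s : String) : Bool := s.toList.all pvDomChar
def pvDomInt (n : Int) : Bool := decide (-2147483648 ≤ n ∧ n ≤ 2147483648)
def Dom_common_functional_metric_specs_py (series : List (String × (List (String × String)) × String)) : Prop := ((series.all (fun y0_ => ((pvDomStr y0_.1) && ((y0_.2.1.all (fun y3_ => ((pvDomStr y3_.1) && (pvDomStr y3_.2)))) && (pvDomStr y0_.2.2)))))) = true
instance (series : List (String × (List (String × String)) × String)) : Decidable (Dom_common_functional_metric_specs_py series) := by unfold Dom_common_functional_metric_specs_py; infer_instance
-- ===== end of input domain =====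

-- B builds the intersection and union of the series' key sets once and filters the spec
-- list by set membership, instead of rescanning every series for each candidate key (objective: simpler).

-- ===== PORT A =====
def common_functional_metric_specs_py (series : List (String × (List (String × String)) × String)) : List (String × String) :=
  if series.isEmpty then []
  else
    let metric_specs : List (String × String) :=
      [("compile_success_rate", "Compile"), ("test_pass_rate", "Pass"), ("pass@1", "Pass@1")]
    let common : List (String × String) :=
      metric_specs.foldl (fun acc kl =>
        if series.all (fun t => t.2.1.any (fun p => p.1 == kl.1)) then acc ++ [kl] else acc) []
    if common ≠ [] then common
    else
      let fallback : List (String × String) :=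
        [("compile_success_rate", "Compile"), ("test_pass_rate", "Pass")]
      fallback.filter (fun kl => series.any (fun t => t.2.1.any (fun p => p.1 == kl.1)))

-- ===== PORT B =====
def common_functional_metric_specs_py_alt (series : List (String × (List (String × String)) × String)) : List (String × String) :=
  match series with
  | [] => []
  | s0 :: rest =>
    let keySet : (String × (List (String × String)) × String) → PySem.Set String :=
      fun t => PySem.Set.ofList (t.2.1.map Prod.fst)
    let restSets := rest.map keySet
    let commonKeys := restSets.foldl PySem.Set.inter (keySet s0)
    let availableKeys := restSets.foldl PySem.Set.union (keySet s0)
    let specs : List (String × String) :=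
      [("compile_success_rate", "Compile"), ("test_pass_rate", "Pass"), ("pass@1", "Pass@1")]
    let chosen := specs.filter (fun kl => PySem.Set.contains commonKeys kl.1)
    if chosen ≠ [] then chosen
    else (specs.take 2).filter (fun kl => PySem.Set.contains availableKeys kl.1)

-- ===== PRECONDITION & SPEC =====
def Spec_common_functional_metric_specs_py (series : List (String × (List (String × String)) × String)) (out : List (String × String)) : Prop := out = common_functional_metric_specs_py_alt series
instance (series : List (String × (List (String × String)) × String)) (out : List (String × String)) : Decidable (Spec_common_functional_metric_specs_py series out) := by unfold Spec_common_functional_metric_specs_py; infer_instance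

-- ===== CLAIM (what is proved, stated in full; the proofs are below) =====
def Claim_equal_common_functional_metric_specs_py : Prop := ∀ (series : List (String × (List (String × String)) × String)), Dom_common_functional_metric_specs_py series → Spec_common_functional_metric_specs_py series (common_functional_metric_specs_py series)

-- ===== LEMMAS AND PROOFS =====

-- membership in a left fold of intersections
theorem pv_mem_foldl_inter (k : String) (s : PySem.Set String) (l : List (PySem.Set String)) :
    k ∈ l.foldl PySem.Set.inter s ↔ k ∈ s ∧ ∀ t ∈ l, k ∈ t := by
  induction l generalizing s with
  | nil => simp
  | cons h tl ih =>
    simp [List.foldl, ih, PySem.Set.mem_inter]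
    tauto

-- membership in a left fold of unions
theorem pv_mem_foldl_union (k : String) (s : PySem.Set String) (l : List (PySem.Set String)) :
    k ∈ l.foldl PySem.Set.union s ↔ k ∈ s ∨ ∃ t ∈ l, k ∈ t := by
  induction l generalizing s with
  | nil => simp
  | cons h tl ih =>
    simp [List.foldl, ih, PySem.Set.mem_union]
    tauto

-- "k in the intersection" = "k in every series' dict"
theorem pv_common_eq (k : String) (s0 : String × (List (String × String)) × String)
    (rest : List (String × (List (String × String)) × String)) :
    PySem.Set.contains
      ((rest.map (fun t => PySem.Set.ofList (t.2.1.map Prod.fst))).foldl PySem.Set.inter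
        (PySem.Set.ofList (s0.2.1.map Prod.fst))) k =
    (s0 :: rest).all (fun t => t.2.1.any (fun p => p.1 == k)) := by
  have : ∀ (a b : Bool), (a = true ↔ b = true) → a = b := by decide
  apply this
  rw [PySem.Set.contains_iff, pv_mem_foldl_inter]
  simp [List.mem_map]
  intro x hx
  constructor
  · intro h a a1 b hab
    have hk := h _ a a1 b hab rfl
    rw [PySem.Set.mem_ofList] at hk
    rcases List.mem_map.mp hk with ⟨p, hp, hpk⟩
    exact ⟨p.2, by rw [← hpk]; simpa using hp⟩
  · intro h t a a1 b hab ht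
    subst ht
    rcases h a a1 b hab with ⟨v, hv⟩
    rw [PySem.Set.mem_ofList]
    exact List.mem_map.mpr ⟨(k, v), hv, rfl⟩

-- "k in the union" = "k in some series' dict"
theorem pv_avail_eq (k : String) (s0 : String × (List (String × String)) × String)
    (rest : List (String × (List (String × String)) × String)) :
    PySem.Set.contains
      ((rest.map (fun t => PySem.Set.ofList (t.2.1.map Prod.fst))).foldl PySem.Set.union
        (PySem.Set.ofList (s0.2.1.map Prod.fst))) k =
    (s0 :: rest).any (fun t => t.2.1.any (fun p => p.1 == k)) := by
  have : ∀ (a b : Bool), (a = true ↔ b = true) → a = b := by decide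
  apply this
  rw [PySem.Set.contains_iff, pv_mem_foldl_union]
  simp [List.mem_map]

-- ===== VERDICT (by name: the statement is the Claim_ definition above) =====
theorem common_functional_metric_specs_py_spec : Claim_equal_common_functional_metric_specs_py := by
  intro series _
  unfold Spec_common_functional_metric_specs_py
  match series with
  | [] => simp [common_functional_metric_specs_py, common_functional_metric_specs_py_alt]
  | s0 :: rest =>
    simp only [common_functional_metric_specs_py, common_functional_metric_specs_py_alt,
      List.foldl, List.filter, List.take, List.isEmpty_cons]
    rw [pv_common_eq, pv_common_eq, pv_common_eq, pv_avail_eq, pv_avail_eq]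
    cases h1 : (s0 :: rest).all (fun t => t.2.1.any (fun p => p.1 == "compile_success_rate")) <;>
    cases h2 : (s0 :: rest).all (fun t => t.2.1.any (fun p => p.1 == "test_pass_rate")) <;>
    cases h3 : (s0 :: rest).all (fun t => t.2.1.any (fun p => p.1 == "pass@1")) <;>
    cases g1 : (s0 :: rest).any (fun t => t.2.1.any (fun p => p.1 == "compile_success_rate")) <;>
    cases g2 : (s0 :: rest).any (fun t => t.2.1.any (fun p => p.1 == "test_pass_rate")) <;>
    simp
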